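-- pv_equiv track=rewrite | github.com/Zim95/foorbar | foobar/level2/problem1/solution1.py | total_henchmen_count
-- ===== SOURCE A (Python) =====
-- fib_cache = {}
--
-- def fibonacci(n):
--     if n == 1:
--         return 1
--     if n == 2:
--         return 1
--     if fib_cache.get(n, 0):
--         return fib_cache[n]
--     result = fibonacci(n-1) + fibonacci(n-2)
--     fib_cache[n] = result
--     return result
--
-- def geometric_series(n):
--     return 2 ** (n - 1)
--
-- def total_henchmen_count(total_lambs, mode, index=1, total_henchmen=0):
--     nth_term = geometric_series(index) if mode == 'g' else fibonacci(index)
--     if nth_term <= total_lambs: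
--         total_henchmen += 1
--         index += 1
--         total_lambs -= nth_term
--         return total_henchmen_count(total_lambs, mode, index=index, total_henchmen=total_henchmen)
--     else:
--         return total_henchmen
-- ===== SOURCE B (Python) =====
-- fib_cache = {}
--
-- def fibonacci(n):
--     if n == 1:
--         return 1
--     if n == 2:
--         return 1
--     if fib_cache.get(n, 0):
--         return fib_cache[n]
--     result = fibonacci(n-1) + fibonacci(n-2)
--     fib_cache[n] = result
--     return result
--
-- def geometric_series(n):
--     return 2 ** (n - 1)
--
-- def total_henchmen_count(total_lambs, mode, index=1, total_henchmen=0):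
--     if mode == 'g':
--         # sum of m geometric terms from index is base*(2**m - 1); largest m with
--         # base*(2**m - 1) <= total_lambs is the bit length of total_lambs//base + 1, minus 1
--         base = geometric_series(index)
--         q = total_lambs // base + 1
--         m = q.bit_length() - 1 if q >= 1 else 0
--         return total_henchmen + m
--     # Fibonacci mode: advance a sliding pair instead of recomputing each term,
--     # and accumulate the running sum instead of decrementing the budget
--     a, b = 1, 1  # fib(index), fib(index+1) after the warm-up loop
--     for _ in range(index - 1):
--         a, b = b, a + b
--     s = 0
--     count = 0
--     while s + a <= total_lambs:
--         s += a
--         count += 1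
--         a, b = b, a + b
--     return total_henchmen + count
-- ===== Notes on version B (the rewrite author's own statement) =====
-- stated objective: alternative
-- what changed: Replaces the greedy budget-decrementing recursion with direct counting: a closed-form bit-length formula for the geometric mode and a sliding Fibonacci-pair loop with a running prefix sum (no recursive fibonacci, no cache) for the other modes.
-- outside the precondition, e.g. on total_henchmen_count(5, 'g', 0, 0): A returns 3, B raises AttributeError; on total_henchmen_count(100, 'f', 960, 0): A returns 0, B returns 0
import Mathlib
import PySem

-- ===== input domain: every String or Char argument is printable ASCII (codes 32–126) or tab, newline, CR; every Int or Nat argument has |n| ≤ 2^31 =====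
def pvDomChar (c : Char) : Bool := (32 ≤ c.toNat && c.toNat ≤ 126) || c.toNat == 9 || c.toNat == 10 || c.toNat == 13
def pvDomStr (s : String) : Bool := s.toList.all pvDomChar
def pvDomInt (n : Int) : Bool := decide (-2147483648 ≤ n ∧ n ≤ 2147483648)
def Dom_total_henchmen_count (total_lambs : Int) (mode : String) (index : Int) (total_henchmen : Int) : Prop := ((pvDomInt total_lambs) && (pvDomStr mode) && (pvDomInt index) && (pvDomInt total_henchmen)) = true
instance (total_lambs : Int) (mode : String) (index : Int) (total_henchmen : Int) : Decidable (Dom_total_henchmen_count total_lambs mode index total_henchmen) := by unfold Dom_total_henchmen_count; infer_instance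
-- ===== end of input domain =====

-- B replaces the greedy budget-decrementing recursion by direct counting: a closed-form
-- bit-length formula for the geometric mode and a sliding Fibonacci-pair loop with a
-- running prefix sum (no recursive fibonacci, no cache) for the other modes.


-- ===== PORT A =====
-- Python's global fib_cache is modelled as a memo dict threaded through each top-level
-- fibonacci call, starting empty: the cache is pure memoization (it only ever stores
-- already-computed fibonacci values), so the returned values are identical.
def pyFib : Nat → PySem.Dict Int Int → Int × PySem.Dict Int Int
  | 0, c => (1, c)      -- Python diverges for n ≤ 0; such inputs are excluded by Pre_
  | 1, c => (1, c)
  | 2, c => (1, c)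
  | n+3, c =>
    if PySem.Dict.getD c ((n : Int) + 3) 0 ≠ 0 then (PySem.Dict.getD c ((n : Int) + 3) 0, c)
    else
      let p1 := pyFib (n+2) c
      let p2 := pyFib (n+1) p1.2
      let r := p1.1 + p2.1
      (r, PySem.Dict.insert p2.2 ((n : Int) + 3) r)

def fibonacci (n : Int) : Int := (pyFib n.toNat PySem.Dict.empty).1

-- exact for n ≥ 1 (Pre_); Python yields a float 2**(n-1) for n ≤ 0, excluded by Pre_
def geometric_series (n : Int) : Int := 2 ^ (n - 1).toNat

-- A's tail recursion, totalized with fuel; fuel (total_lambs.toNat + 1) is always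
-- sufficient because each step consumes nth_term ≥ 1 of the budget (see the lemmas).
def thcLoopA : Nat → Int → String → Int → Int → Int
  | 0, _, _, _, total_henchmen => total_henchmen
  | fuel+1, total_lambs, mode, index, total_henchmen =>
    let nth_term := if mode == "g" then geometric_series index else fibonacci index
    if nth_term ≤ total_lambs then
      thcLoopA fuel (total_lambs - nth_term) mode (index + 1) (total_henchmen + 1)
    else
      total_henchmen

def total_henchmen_count (total_lambs : Int) (mode : String) (index : Int) (total_henchmen : Int) : Int :=
  thcLoopA (total_lambs.toNat + 1) total_lambs mode index total_henchmen

-- ===== PORT B =====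
-- Source B's warm-up loop "a, b = 1, 1; for _ in range(index-1): a, b = b, a+b"
def fibPairB : Nat → Int × Int
  | 0 => (1, 1)
  | k+1 => ((fibPairB k).2, (fibPairB k).1 + (fibPairB k).2)

-- Source B's while loop "while s + a <= total_lambs: s += a; count += 1; a, b = b, a+b",
-- totalized with fuel; fuel (T.toNat + 1) is always sufficient because s grows by a ≥ 1.
def fibLoopB : Nat → Int → Int → Int → Int → Int → Int
  | 0, _, _, _, _, count => count
  | fuel+1, T, a, b, s, count =>
    if s + a ≤ T then fibLoopB fuel T b (a + b) (s + a) (count + 1) else count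

def total_henchmen_count_alt (total_lambs : Int) (mode : String) (index : Int) (total_henchmen : Int) : Int :=
  if mode == "g" then
    -- q.bit_length() is PySem.Int.bitLength
    let base := geometric_series index
    let q := PySem.Int.floordiv total_lambs base + 1
    let m : Int := if 1 ≤ q then (PySem.Int.bitLength q : Int) - 1 else 0
    total_henchmen + m
  else
    let p := fibPairB (index - 1).toNat
    total_henchmen + fibLoopB (total_lambs.toNat + 1) total_lambs p.1 p.2 0 0

-- ===== PRECONDITION & SPEC =====
-- Pre_ excludes index < 1 (there Python's fibonacci recurses forever for mode ≠ 'g', and for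
-- mode 'g' A computes with Python floats via 2**(index-1), which the Int port cannot mirror),
-- and fibonacci-mode starting indices near the interpreter recursion limit, where A's
-- RecursionError vs. return depends on the recursion limit and leftover fib_cache state.
def Pre_total_henchmen_count (total_lambs : Int) (mode : String) (index : Int) (total_henchmen : Int) : Prop :=
  1 ≤ index ∧ (mode = "g" ∨ index ≤ 950)
instance (total_lambs : Int) (mode : String) (index : Int) (total_henchmen : Int) : Decidable (Pre_total_henchmen_count total_lambs mode index total_henchmen) := by unfold Pre_total_henchmen_count; infer_instance

def pvWitness_total_henchmen_count : Int × String × Int × Int := (100, "f", 1, 0)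

def Spec_total_henchmen_count (total_lambs : Int) (mode : String) (index : Int) (total_henchmen : Int) (out : Int) : Prop := out = total_henchmen_count_alt total_lambs mode index total_henchmen
instance (total_lambs : Int) (mode : String) (index : Int) (total_henchmen : Int) (out : Int) : Decidable (Spec_total_henchmen_count total_lambs mode index total_henchmen out) := by unfold Spec_total_henchmen_count; infer_instance

-- ===== CLAIM (what is proved, stated in full; the proofs are below) =====
def Claim_equal_total_henchmen_count : Prop := ∀ (total_lambs : Int) (mode : String) (index : Int) (total_henchmen : Int), Dom_total_henchmen_count total_lambs mode index total_henchmen → Pre_total_henchmen_count total_lambs mode index total_henchmen → Spec_total_henchmen_count total_lambs mode index total_henchmen (total_henchmen_count total_lambs mode index total_henchmen)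

-- ===== LEMMAS AND PROOFS =====

theorem fibPairB_pos (k : Nat) : 1 ≤ (fibPairB k).1 ∧ 1 ≤ (fibPairB k).2 := by
  induction k with
  | zero => exact ⟨le_refl 1, le_refl 1⟩
  | succ k ih => exact ⟨ih.2, by simp only [fibPairB]; omega⟩

theorem fibPairB_succ_succ_fst (k : Nat) :
    (fibPairB (k+2)).1 = (fibPairB (k+1)).1 + (fibPairB k).1 := by
  simp only [fibPairB]
  omega

-- cache entries are exactly already-computed fibonacci values
def pvCacheOK (c : PySem.Dict Int Int) : Prop :=
  ∀ k : Int, PySem.Dict.getD c k 0 = 0 ∨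
    (3 ≤ k ∧ PySem.Dict.getD c k 0 = (fibPairB (k - 1).toNat).1)

theorem pyFib_spec : ∀ (n : Nat) (c : PySem.Dict Int Int), pvCacheOK c →
    (pyFib n c).1 = (fibPairB (n - 1)).1 ∧ pvCacheOK (pyFib n c).2 := by
  intro n
  induction n using Nat.strong_induction_on with
  | _ n ih =>
    rcases n with _|(_|(_|n)) <;> intro c hc
    · exact ⟨rfl, hc⟩
    · exact ⟨rfl, hc⟩
    · exact ⟨rfl, hc⟩
    · rw [pyFib]
      by_cases hg : PySem.Dict.getD c ((n : Int) + 3) 0 ≠ 0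
      · rw [if_pos hg]
        refine ⟨?_, hc⟩
        rcases hc ((n : Int) + 3) with h0 | ⟨_, h1⟩
        · exact absurd h0 hg
        · have hidx : (((n : Int) + 3) - 1).toNat = n + 2 := by omega
          show PySem.Dict.getD c ((n : Int) + 3) 0 = (fibPairB (n + 2)).1
          rw [h1, hidx]
      · rw [if_neg hg]
        have H1 := ih (n+2) (by omega) c hc
        have H2 := ih (n+1) (by omega) (pyFib (n+2) c).2 H1.2
        constructor
        · dsimp only
          rw [H1.1, H2.1]
          show (fibPairB (n+1)).1 + (fibPairB n).1 = (fibPairB (n+2)).1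
          rw [fibPairB_succ_succ_fst]
        · dsimp only
          intro k
          by_cases hk : k = (n : Int) + 3
          · subst hk
            rw [PySem.Dict.getD_insert_self]
            right
            refine ⟨by omega, ?_⟩
            have hidx : (((n : Int) + 3) - 1).toNat = n + 2 := by omega
            rw [H1.1, H2.1, hidx]
            show (fibPairB (n+1)).1 + (fibPairB n).1 = (fibPairB (n+2)).1
            rw [fibPairB_succ_succ_fst]
          · rw [PySem.Dict.getD_insert_of_ne _ _ _ hk]
            exact H2.2 k

theorem fibonacci_eq (i : Int) (hi : 1 ≤ i) :
    fibonacci i = (fibPairB (i - 1).toNat).1 := by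
  unfold fibonacci
  have h := pyFib_spec i.toNat PySem.Dict.empty (fun k => Or.inl (PySem.Dict.getD_empty k 0))
  rw [h.1]
  have e : i.toNat - 1 = (i - 1).toNat := by omega
  rw [e]

theorem geo_pos (i : Int) : 1 ≤ geometric_series i := by
  unfold geometric_series
  exact one_le_pow₀ (by norm_num)

-- the canonical form of Source B's while loop, started at s = count = 0 with adequate fuel
def pvL (T a b : Int) : Int := fibLoopB (T.toNat + 1) T a b 0 0

theorem fibLoopB_fuel_irrel : ∀ (f1 f2 : Nat) (T a b s c : Int), 1 ≤ a → 1 ≤ b →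
    (T - s).toNat < f1 → (T - s).toNat < f2 →
    fibLoopB f1 T a b s c = fibLoopB f2 T a b s c := by
  intro f1
  induction f1 with
  | zero => intro f2 T a b s c _ _ h1 _; omega
  | succ f1 ih =>
    intro f2 T a b s c ha hb h1 h2
    rcases f2 with _|f2
    · omega
    · simp only [fibLoopB]
      by_cases hc : s + a ≤ T
      · rw [if_pos hc, if_pos hc]
        exact ih f2 T b (a+b) (s+a) (c+1) hb (by omega) (by omega) (by omega)
      · rw [if_neg hc, if_neg hc]

theorem fibLoopB_shift : ∀ (f : Nat) (T a b s c : Int), 1 ≤ a → 1 ≤ b →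
    (T - s).toNat < f →
    fibLoopB f T a b s c = c + fibLoopB f (T - s) a b 0 0 := by
  intro f
  induction f with
  | zero => intro T a b s c _ _ h1; omega
  | succ f ih =>
    intro T a b s c ha hb h1
    simp only [fibLoopB]
    by_cases hc : s + a ≤ T
    · rw [if_pos hc, if_pos (show (0:Int) + a ≤ T - s by omega)]
      rw [ih T b (a+b) (s+a) (c+1) hb (by omega) (by omega)]
      rw [ih (T-s) b (a+b) (0+a) (0+1) hb (by omega) (by omega)]
      have e : T - (s + a) = T - s - (0 + a) := by ring
      rw [e]
      omega
    · rw [if_neg hc, if_neg (show ¬ ((0:Int) + a ≤ T - s) by omega)]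
      omega

theorem fib_main : ∀ (f : Nat) (t i h : Int) (m : String), (m == "g") = false → 1 ≤ i →
    t.toNat < f →
    thcLoopA f t m i h = h + pvL t (fibPairB (i - 1).toNat).1 (fibPairB (i - 1).toNat).2 := by
  intro f
  induction f with
  | zero => intro t i h m _ _ hf; omega
  | succ f ih =>
    intro t i h m hm hi hf
    have ha := (fibPairB_pos (i - 1).toNat).1
    have hb := (fibPairB_pos (i - 1).toNat).2
    simp only [thcLoopA, hm, Bool.false_eq_true, if_false]
    rw [fibonacci_eq i hi]
    by_cases hc : (fibPairB (i - 1).toNat).1 ≤ t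
    · rw [if_pos hc]
      unfold pvL
      simp only [fibLoopB]
      rw [if_pos (show (0:Int) + (fibPairB (i - 1).toNat).1 ≤ t by omega)]
      rw [fibLoopB_shift t.toNat t (fibPairB (i - 1).toNat).2
          ((fibPairB (i - 1).toNat).1 + (fibPairB (i - 1).toNat).2)
          (0 + (fibPairB (i - 1).toNat).1) (0 + 1) hb (by omega) (by omega)]
      rw [show t - (0 + (fibPairB (i - 1).toNat).1) = t - (fibPairB (i - 1).toNat).1 by ring]
      rw [ih (t - (fibPairB (i - 1).toNat).1) (i+1) (h+1) m hm (by omega) (by omega)]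
      have hidx : (i + 1 - 1).toNat = (i - 1).toNat + 1 := by omega
      rw [hidx]
      simp only [fibPairB]
      unfold pvL
      rw [fibLoopB_fuel_irrel ((t - (fibPairB (i - 1).toNat).1).toNat + 1) t.toNat
          (t - (fibPairB (i - 1).toNat).1) (fibPairB (i - 1).toNat).2
          ((fibPairB (i - 1).toNat).1 + (fibPairB (i - 1).toNat).2) 0 0 hb (by omega)
          (by omega) (by omega)]
      omega
    · rw [if_neg hc]
      unfold pvL
      simp only [fibLoopB]
      rw [if_neg (show ¬ ((0:Int) + (fibPairB (i - 1).toNat).1 ≤ t) by omega)]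
      omega

theorem geo_stop (t i : Int) (hbt : ¬ geometric_series i ≤ t) :
    (if 1 ≤ PySem.Int.floordiv t (geometric_series i) + 1
     then (PySem.Int.bitLength (PySem.Int.floordiv t (geometric_series i) + 1) : Int) - 1
     else 0) = 0 := by
  have hb1 := geo_pos i
  have hd : PySem.Int.floordiv t (geometric_series i) < 1 := by
    rw [PySem.Int.floordiv_lt_iff_lt_mul (by omega)]
    omega
  by_cases h1 : 1 ≤ PySem.Int.floordiv t (geometric_series i) + 1
  · rw [if_pos h1]
    have hq : PySem.Int.floordiv t (geometric_series i) + 1 = 1 := by omega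
    rw [hq]
    have hbit : PySem.Int.bitLength (1 : Int) = 1 := by decide
    rw [hbit]
    omega
  · rw [if_neg h1]

theorem geo_main : ∀ (f : Nat) (t i h : Int), 1 ≤ i → t.toNat < f →
    thcLoopA f t "g" i h
      = h + (if 1 ≤ PySem.Int.floordiv t (geometric_series i) + 1
             then (PySem.Int.bitLength (PySem.Int.floordiv t (geometric_series i) + 1) : Int) - 1
             else 0) := by
  intro f
  induction f with
  | zero => intro t i h _ hf; omega
  | succ f ih =>
    intro t i h hi hf
    have hb1 := geo_pos i
    simp only [thcLoopA, beq_self_eq_true, if_true]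
    by_cases hbt : geometric_series i ≤ t
    · rw [if_pos hbt]
      rw [ih (t - geometric_series i) (i+1) (h+1) (by omega) (by omega)]
      set base := geometric_series i with hbase
      set d := PySem.Int.floordiv t base with hdd
      have hd1 : 1 ≤ d := by
        rw [hdd, PySem.Int.le_floordiv_iff_mul_le (by omega), one_mul]
        exact hbt
      have hlow : d * base ≤ t := by
        have := (PySem.Int.le_floordiv_iff_mul_le (a := t) (b := base) (q := d) (by omega)).mp (by rw [hdd])
        exact this
      have hhigh : t < (d + 1) * base := by
        have := (PySem.Int.floordiv_lt_iff_lt_mul (a := t) (b := base) (q := d + 1) (by omega)).mp (by rw [← hdd]; omega)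
        exact this
      have hbase' : geometric_series (i+1) = base * 2 := by
        rw [hbase]
        unfold geometric_series
        rw [show (i + 1 - 1).toNat = (i - 1).toNat + 1 by omega, pow_succ]
      have hd' : PySem.Int.floordiv (t - base) (geometric_series (i+1)) = (d + 1) / 2 - 1 := by
        rw [hbase']
        rw [PySem.Int.floordiv_eq_iff_of_pos (by omega)]
        have h2v : 2 * ((d + 1) / 2 - 1) = d - 1 ∨ 2 * ((d + 1) / 2 - 1) = d - 2 := by omega
        constructor
        · have e : ((d + 1) / 2 - 1) * (base * 2) = 2 * ((d + 1) / 2 - 1) * base := by ring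
          rw [e]
          rcases h2v with hv | hv <;> rw [hv]
          · have e2 : (d - 1) * base = d * base - base := by ring
            rw [e2]; linarith [hlow]
          · have e2 : (d - 2) * base = d * base - 2 * base := by ring
            rw [e2]; linarith [hlow, hb1]
        · have e : ((d + 1) / 2 - 1 + 1) * (base * 2) = (2 * ((d + 1) / 2 - 1) + 2) * base := by ring
          rw [e]
          rcases h2v with hv | hv <;> rw [hv]
          · have e2 : (d - 1 + 2) * base = (d + 1) * base := by ring
            rw [e2]; linarith [hhigh, hb1]
          · have e2 : (d - 2 + 2) * base = d * base := by ring
            rw [e2]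
            have e3 : (d + 1) * base = d * base + base := by ring
            linarith [hhigh, e3]
      rw [hd']
      rw [if_pos (show (1:Int) ≤ (d + 1) / 2 - 1 + 1 by omega)]
      rw [if_pos (show (1:Int) ≤ d + 1 by omega)]
      rw [show (d + 1) / 2 - 1 + 1 = (d + 1) / 2 by omega]
      rw [PySem.Int.bitLength_of_pos (show (0:Int) < d + 1 by omega)]
      rw [PySem.Int.floordiv_eq_ediv_of_pos (by norm_num)]
      push_cast
      omega
    · rw [if_neg hbt, geo_stop t i hbt]
      omega

-- ===== VERDICT (by name: the statement is the Claim_ definition above) =====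
theorem total_henchmen_count_spec : Claim_equal_total_henchmen_count := by
  intro t mode i h _dom pre
  unfold Spec_total_henchmen_count
  by_cases hm : mode = "g"
  · subst hm
    simp only [total_henchmen_count, total_henchmen_count_alt, beq_self_eq_true, if_true]
    exact geo_main (t.toNat + 1) t i h pre.1 (by omega)
  · have hm' : (mode == "g") = false := by simp [hm]
    simp only [total_henchmen_count, total_henchmen_count_alt, hm', Bool.false_eq_true, if_false]
    rw [fib_main (t.toNat + 1) t i h mode hm' pre.1 (by omega)]
    rfl
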